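-- pv_equiv track=rewrite | github.com/zhuyinghua6961/LiFeO4Agent | backend/services/user_data_validator.py | check_duplicate_in_file
-- ===== SOURCE A (Python) =====
-- from typing import Tuple, Set, List
--
-- def check_duplicate_in_file(usernames: List[str]) -> Set[str]:
--     """
--     检查文件中重复的用户名
--
--     Args:
--         usernames: 用户名列表
--
--     Returns:
--         重复的用户名集合
--     """
--     seen = set()
--     duplicates = set()
--
--     for username in usernames:
--         if username in seen:
--             duplicates.add(username)
--         else:
--             seen.add(username)
--
--     return duplicates
-- ===== SOURCE B (Python) =====
-- from typing import List, Set
--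
-- def check_duplicate_in_file(usernames: List[str]) -> Set[str]:
--     first = {}
--     for i, u in enumerate(usernames):
--         first.setdefault(u, i)
--     return {u for i, u in enumerate(usernames) if first[u] < i}
-- ===== Notes on version B (the rewrite author's own statement) =====
-- stated objective: alternative
-- what changed: Replaces the incremental two-set membership branching by two passes: a dict recording each username's first index (setdefault), then a set comprehension keeping the occurrences whose first index is earlier.
import Mathlib
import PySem

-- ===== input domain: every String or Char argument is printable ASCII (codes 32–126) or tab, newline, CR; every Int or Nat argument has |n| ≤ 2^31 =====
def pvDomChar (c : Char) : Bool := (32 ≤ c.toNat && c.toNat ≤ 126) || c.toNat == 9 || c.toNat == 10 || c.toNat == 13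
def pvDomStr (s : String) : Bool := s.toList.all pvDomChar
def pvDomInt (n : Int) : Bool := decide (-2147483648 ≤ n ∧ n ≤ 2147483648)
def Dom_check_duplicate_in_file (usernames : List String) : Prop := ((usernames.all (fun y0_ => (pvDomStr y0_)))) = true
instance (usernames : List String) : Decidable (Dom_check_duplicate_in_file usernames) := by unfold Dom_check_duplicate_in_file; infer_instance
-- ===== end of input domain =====

-- B replaces A's two-set membership loop by two passes: a first-index dict, then a comprehension keeping occurrences whose first index is earlier (alternative; same cost).

-- ===== PORT A =====
-- literal port of A's loop: state (seen, duplicates), branch on membership in seen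
def check_duplicate_in_file (usernames : List String) : List String :=
  (usernames.foldl
    (fun (st : PySem.Set String × PySem.Set String) username =>
      if PySem.Set.contains st.1 username then (st.1, PySem.Set.add st.2 username)
      else (PySem.Set.add st.1 username, st.2))
    ((PySem.Set.empty : PySem.Set String), (PySem.Set.empty : PySem.Set String))).2

-- ===== PORT B =====
-- literal port of B: first-index dict via setdefault, then
-- {u for i, u in enumerate(usernames) if first[u] < i}.
-- first[u]: the first pass inserted a binding for every element of the list, so get? is
-- always some here and the .getD default is never reached — exact for Python's first[u].
def check_duplicate_in_file_alt (usernames : List String) : List String :=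
  let first := (PySem.List.enumerate usernames).foldl
      (fun d p => PySem.Dict.setdefault d p.2 p.1) PySem.Dict.empty
  PySem.Set.ofList
    (((PySem.List.enumerate usernames).filter
        (fun p => decide (((first.get? p.2).getD 0) < p.1))).map (·.2))

-- ===== PRECONDITION & SPEC =====
def Spec_check_duplicate_in_file (usernames : List String) (out : List String) : Prop := out = check_duplicate_in_file_alt usernames
instance (usernames : List String) (out : List String) : Decidable (Spec_check_duplicate_in_file usernames out) := by unfold Spec_check_duplicate_in_file; infer_instance

-- ===== CLAIM (what is proved, stated in full; the proofs are below) =====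
def Claim_equal_check_duplicate_in_file : Prop := ∀ (usernames : List String), Dom_check_duplicate_in_file usernames → Spec_check_duplicate_in_file usernames (check_duplicate_in_file usernames)

-- ===== LEMMAS AND PROOFS =====

-- abbreviation for A's loop step (proof-side only)
def pvAStep (st : PySem.Set String × PySem.Set String) (username : String) :
    PySem.Set String × PySem.Set String :=
  if PySem.Set.contains st.1 username then (st.1, PySem.Set.add st.2 username)
  else (PySem.Set.add st.1 username, st.2)

theorem pvAStep_fst (st : PySem.Set String × PySem.Set String) (u : String) :
    (pvAStep st u).1 = PySem.Set.add st.1 u := by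
  unfold pvAStep PySem.Set.add
  split_ifs with h <;> simp_all [PySem.Set.contains]

theorem pvAStep_snd (st : PySem.Set String × PySem.Set String) (u : String) :
    (pvAStep st u).2 = if PySem.Set.contains st.1 u then PySem.Set.add st.2 u else st.2 := by
  unfold pvAStep; split_ifs <;> rfl

theorem pvA_fst (xs : List String) (st : PySem.Set String × PySem.Set String) :
    (xs.foldl pvAStep st).1 = List.foldl PySem.Set.add st.1 xs := by
  induction xs generalizing st with
  | nil => rfl
  | cons y ys ih => simp [List.foldl, ih, pvAStep_fst]

theorem pvOfList_append_singleton (xs : List String) (x : String) :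
    PySem.Set.ofList (xs ++ [x]) = PySem.Set.add (PySem.Set.ofList xs) x := by
  simp [PySem.Set.ofList_eq_foldl, List.foldl_append]

theorem pvEnumerate_append_singleton (xs : List String) (x : String) (s : Int) :
    PySem.List.enumerate (xs ++ [x]) s
      = PySem.List.enumerate xs s ++ [((s + xs.length : Int), x)] := by
  induction xs generalizing s with
  | nil => simp [PySem.List.enumerate_cons, PySem.List.enumerate_nil]
  | cons y ys ih => simp [PySem.List.enumerate_cons, ih]; ring_nf

-- snd of each enumerate entry is an element of the list
theorem pvEnumerate_snd_mem (xs : List String) (p : Int × String)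
    (h : p ∈ PySem.List.enumerate xs 0) : p.2 ∈ xs := by
  have := PySem.List.map_snd_enumerate xs 0
  rw [← this]
  exact List.mem_map_of_mem h

-- the first-index dict built by B's first pass (proof-side abbreviation)
def pvFd (xs : List String) : PySem.Dict String Int :=
  (PySem.List.enumerate xs).foldl (fun d p => PySem.Dict.setdefault d p.2 p.1) PySem.Dict.empty

theorem pvSetdefault_eq {κ ν : Type} [BEq κ] (d : PySem.Dict κ ν) (k : κ) (v : ν) :
    PySem.Dict.setdefault d k v = if d.contains k then d else d.insert k v := by
  by_cases h : d.contains k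
  · simp [PySem.Dict.setdefault, h]
  · simp [PySem.Dict.setdefault, PySem.Dict.insert, h]

theorem pvFd_append (xs : List String) (x : String) :
    pvFd (xs ++ [x])
      = if (pvFd xs).contains x then pvFd xs
        else (pvFd xs).insert x ((0 : Int) + xs.length) := by
  have h1 : pvFd (xs ++ [x]) = PySem.Dict.setdefault (pvFd xs) x ((0 : Int) + xs.length) := by
    unfold pvFd
    rw [pvEnumerate_append_singleton, List.foldl_append, List.foldl_cons, List.foldl_nil]
  rw [h1, pvSetdefault_eq]

theorem pvFd_get? (xs : List String) (u : String) :
    if u ∈ xs then ∃ j : Int, (pvFd xs).get? u = some j ∧ j < xs.length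
    else (pvFd xs).get? u = none := by
  induction xs using List.reverseRecOn generalizing u with
  | nil => simp; rfl
  | append_singleton xs x ih =>
      rw [pvFd_append]
      by_cases hc : (pvFd xs).contains x
      · -- x already bound, hence x ∈ xs; dict unchanged
        have hxmem : x ∈ xs := by
          by_contra hx
          have ihx := ih x
          rw [if_neg hx] at ihx
          rw [PySem.Dict.contains_eq_isSome_get?, ihx] at hc
          simp at hc
        rw [if_pos hc]
        by_cases hu : u ∈ xs ++ [x]
        · rw [if_pos hu]
          rcases List.mem_append.mp hu with hu' | hu'
          · have ihu := ih u
            rw [if_pos hu'] at ihu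
            obtain ⟨j, hj, hlt⟩ := ihu
            exact ⟨j, hj, by simp; omega⟩
          · have : u = x := by simpa using hu'
            subst this
            have ihu := ih u
            rw [if_pos hxmem] at ihu
            obtain ⟨j, hj, hlt⟩ := ihu
            exact ⟨j, hj, by simp; omega⟩
        · rw [if_neg hu]
          have hu' : u ∉ xs := fun h => hu (List.mem_append.mpr (Or.inl h))
          have ihu := ih u
          rw [if_neg hu'] at ihu
          exact ihu
      · -- x new: dict gains the binding x ↦ len xs
        have hxnot : x ∉ xs := by
          intro hx
          have ihx := ih x
          rw [if_pos hx] at ihx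
          obtain ⟨j, hj, _⟩ := ihx
          rw [PySem.Dict.contains_eq_isSome_get?, hj] at hc
          simp at hc
        rw [if_neg hc]
        by_cases hu : u ∈ xs ++ [x]
        · rw [if_pos hu]
          rcases List.mem_append.mp hu with hu' | hu'
          · have hne : u ≠ x := fun h => hxnot (h ▸ hu')
            rw [PySem.Dict.get?_insert_of_ne _ _ hne]
            have ihu := ih u
            rw [if_pos hu'] at ihu
            obtain ⟨j, hj, hlt⟩ := ihu
            exact ⟨j, hj, by simp; omega⟩
          · have : u = x := by simpa using hu'
            subst this
            rw [PySem.Dict.get?_insert_self]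
            exact ⟨(0 : Int) + xs.length, rfl, by simp⟩
        · rw [if_neg hu]
          have hu' : u ∉ xs := fun h => hu (List.mem_append.mpr (Or.inl h))
          have hne : u ≠ x := fun h => hu (List.mem_append.mpr (Or.inr (by simp [h])))
          rw [PySem.Dict.get?_insert_of_ne _ _ hne]
          have ihu := ih u
          rw [if_neg hu'] at ihu
          exact ihu

theorem pvFd_get?_of_mem (xs : List String) (u : String) (h : u ∈ xs) :
    ∃ j : Int, (pvFd xs).get? u = some j ∧ j < xs.length := by
  have := pvFd_get? xs u
  rwa [if_pos h] at this

theorem pvFd_contains_iff (xs : List String) (u : String) :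
    (pvFd xs).contains u = true ↔ u ∈ xs := by
  rw [PySem.Dict.contains_eq_isSome_get?]
  constructor
  · intro hc
    by_contra hu
    have := pvFd_get? xs u
    rw [if_neg hu] at this
    rw [this] at hc
    simp at hc
  · intro hu
    obtain ⟨j, hj, _⟩ := pvFd_get?_of_mem xs u hu
    simp [hj]

-- earlier elements see the same first index in the extended dict
theorem pvFd_get?_append_of_mem (xs : List String) (x u : String) (h : u ∈ xs) :
    (pvFd (xs ++ [x])).get? u = (pvFd xs).get? u := by
  rw [pvFd_append]
  by_cases hc : (pvFd xs).contains x
  · rw [if_pos hc]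
  · rw [if_neg hc]
    have hxnot : x ∉ xs := fun hx => hc ((pvFd_contains_iff xs x).mpr hx)
    exact PySem.Dict.get?_insert_of_ne _ _ (fun he => hxnot (he ▸ h))

-- B satisfies the same append recurrence as A's duplicates set
theorem pvAlt_append_singleton (xs : List String) (x : String) :
    check_duplicate_in_file_alt (xs ++ [x])
      = if x ∈ xs then PySem.Set.add (check_duplicate_in_file_alt xs) x
        else check_duplicate_in_file_alt xs := by
  show PySem.Set.ofList
      (((PySem.List.enumerate (xs ++ [x])).filter
          (fun p => decide ((((pvFd (xs ++ [x])).get? p.2).getD 0) < p.1))).map (·.2)) = _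
  rw [pvEnumerate_append_singleton, List.filter_append]
  have hcongr :
      (PySem.List.enumerate xs 0).filter
          (fun p => decide ((((pvFd (xs ++ [x])).get? p.2).getD 0) < p.1))
        = (PySem.List.enumerate xs 0).filter
          (fun p => decide ((((pvFd xs).get? p.2).getD 0) < p.1)) := by
    apply List.filter_congr
    intro p hp
    rw [pvFd_get?_append_of_mem xs x p.2 (pvEnumerate_snd_mem xs p hp)]
  rw [hcongr]
  have hlast :
      (List.filter (fun p => decide ((((pvFd (xs ++ [x])).get? p.2).getD 0) < p.1))
          [((0 + xs.length : Int), x)])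
        = if x ∈ xs then [((0 + xs.length : Int), x)] else [] := by
    simp only [List.filter]
    by_cases hx : x ∈ xs
    · rw [if_pos hx]
      rw [pvFd_get?_append_of_mem xs x x hx]
      obtain ⟨j, hj, hlt⟩ := pvFd_get?_of_mem xs x hx
      rw [hj]
      simp only [Option.getD_some]
      rw [decide_eq_true (by omega)]
    · rw [if_neg hx]
      rw [pvFd_append, if_neg (by simp [pvFd_contains_iff xs x, hx]),
          PySem.Dict.get?_insert_self]
      simp only [Option.getD_some]
      rw [decide_eq_false (by omega)]
  rw [hlast]
  by_cases hx : x ∈ xs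
  · simp only [if_pos hx, List.map_append, List.map_cons, List.map_nil]
    rw [pvOfList_append_singleton]
    rfl
  · simp only [if_neg hx, List.append_nil]
    rfl

-- ===== VERDICT (by name: the statement is the Claim_ definition above) =====
theorem check_duplicate_in_file_spec : Claim_equal_check_duplicate_in_file := by
  unfold Claim_equal_check_duplicate_in_file
  intro usernames hdom
  unfold Spec_check_duplicate_in_file
  induction usernames using List.reverseRecOn with
  | nil => rfl
  | append_singleton xs x ih =>
      have hdx : Dom_check_duplicate_in_file xs := by
        unfold Dom_check_duplicate_in_file at hdom ⊢
        simp [List.all_append] at hdom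
        simp
        exact hdom.1
      have ih' := ih hdx
      rw [pvAlt_append_singleton]
      have hA : check_duplicate_in_file xs
          = (List.foldl pvAStep (PySem.Set.empty, PySem.Set.empty) xs).2 := rfl
      show (List.foldl pvAStep (PySem.Set.empty, PySem.Set.empty) (xs ++ [x])).2 = _
      rw [List.foldl_append, List.foldl_cons, List.foldl_nil]
      have hmem : PySem.Set.contains
          (List.foldl pvAStep (PySem.Set.empty, PySem.Set.empty) xs).1 x = decide (x ∈ xs) := by
        have hfst : (List.foldl pvAStep (PySem.Set.empty, PySem.Set.empty) xs).1
            = PySem.Set.ofList xs := by rw [pvA_fst]; rfl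
        rw [hfst]
        by_cases hx : x ∈ xs <;> simp [hx, PySem.Set.contains, PySem.Set.mem_ofList]
      rw [pvAStep_snd, hmem]
      by_cases hx : x ∈ xs <;> simp [hx, ← ih', hA]
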